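-- pv_equiv track=rewrite | github.com/Index700/WordNet | wordnet.py | judge_words
-- ===== SOURCE A (Python) =====
-- def judge_words(relate_word):
--     hyponym = []
--     hypernym = []
--     relate = []
--     for r in relate_word:
--         if r[0] == "<":
--             pass
--         elif r[0] == '@':
--             hyponym.append(r[1])
--         elif r[0] == '~':
--             hypernym.append(r[1])
--         elif r[0] == '+':
--             relate.append(r[1])
--
--     return hyponym, hypernym, relate
-- ===== SOURCE B (Python) =====
-- def judge_words(relate_word):
--     hyponym = [r[1] for r in relate_word if r[0] == '@']
--     hypernym = [r[1] for r in relate_word if r[0] == '~']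
--     relate = [r[1] for r in relate_word if r[0] == '+']
--     return hyponym, hypernym, relate
-- ===== Notes on version B (the rewrite author's own statement) =====
-- stated objective: idiomatic
-- what changed: Replaces the single branching loop with three independent filtering comprehensions, one per relation symbol; elements with other symbols (including '<') are excluded by all filters.
import Mathlib
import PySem

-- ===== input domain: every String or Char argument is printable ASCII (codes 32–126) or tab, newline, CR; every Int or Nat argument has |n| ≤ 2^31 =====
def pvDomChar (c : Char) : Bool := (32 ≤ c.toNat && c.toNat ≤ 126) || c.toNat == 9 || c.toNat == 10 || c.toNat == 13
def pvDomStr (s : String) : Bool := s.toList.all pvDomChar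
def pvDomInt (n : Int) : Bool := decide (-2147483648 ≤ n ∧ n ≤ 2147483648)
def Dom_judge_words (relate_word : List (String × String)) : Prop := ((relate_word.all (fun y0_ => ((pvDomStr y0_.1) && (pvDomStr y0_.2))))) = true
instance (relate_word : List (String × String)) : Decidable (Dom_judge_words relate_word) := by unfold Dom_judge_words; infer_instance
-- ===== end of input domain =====

-- B replaces A's single branching loop with three independent filters (one per symbol); return values agree, idiomatic decomposition.

-- ===== PORT A =====
-- literal port of A's single loop: fold over relate_word threading the three accumulators
-- the loop body of A, as a named step function
def judgeStep (st : List String × List String × List String) (r : String × String) : List String × List String × List String :=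
  let (hyponym, hypernym, relate) := st
  if r.1 == "<" then (hyponym, hypernym, relate)
  else if r.1 == "@" then (hyponym ++ [r.2], hypernym, relate)
  else if r.1 == "~" then (hyponym, hypernym ++ [r.2], relate)
  else if r.1 == "+" then (hyponym, hypernym, relate ++ [r.2])
  else (hyponym, hypernym, relate)

def judge_words (relate_word : List (String × String)) : List String × List String × List String :=
  relate_word.foldl judgeStep ([], [], [])

-- ===== PORT B =====
-- literal port of B: three filtering comprehensions
def judge_words_alt (relate_word : List (String × String)) : List String × List String × List String :=
  ((relate_word.filter (fun r => r.1 == "@")).map (fun r => r.2),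
   (relate_word.filter (fun r => r.1 == "~")).map (fun r => r.2),
   (relate_word.filter (fun r => r.1 == "+")).map (fun r => r.2))

-- ===== PRECONDITION & SPEC =====
def Spec_judge_words (relate_word : List (String × String)) (out : List String × List String × List String) : Prop := out = judge_words_alt relate_word
instance (relate_word : List (String × String)) (out : List String × List String × List String) : Decidable (Spec_judge_words relate_word out) := by unfold Spec_judge_words; infer_instance

-- ===== CLAIM (what is proved, stated in full; the proofs are below) =====
def Claim_equal_judge_words : Prop := ∀ (relate_word : List (String × String)), Dom_judge_words relate_word → Spec_judge_words relate_word (judge_words relate_word)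

-- ===== LEMMAS AND PROOFS =====

-- loop invariant: folding from any accumulator appends the three filtered projections
theorem judge_words_foldl (relate_word : List (String × String))
    (h1 h2 h3 : List String) :
    relate_word.foldl judgeStep (h1, h2, h3)
    = (h1 ++ (relate_word.filter (fun r => r.1 == "@")).map (fun r => r.2),
       h2 ++ (relate_word.filter (fun r => r.1 == "~")).map (fun r => r.2),
       h3 ++ (relate_word.filter (fun r => r.1 == "+")).map (fun r => r.2)) := by
  induction relate_word generalizing h1 h2 h3 with
  | nil => simp
  | cons r rs ih =>
    rw [List.foldl_cons]
    by_cases hlt : r.1 == "<"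
    · have h2' : ¬ (r.1 == "@") = true := by simp_all
      have h3' : ¬ (r.1 == "~") = true := by simp_all
      have h4' : ¬ (r.1 == "+") = true := by simp_all
      rw [show judgeStep (h1, h2, h3) r = (h1, h2, h3) from by
        simp [judgeStep, hlt], ih]
      simp [List.filter_cons, h2', h3', h4']
    · by_cases ha : r.1 == "@"
      · have h3' : ¬ (r.1 == "~") = true := by simp_all
        have h4' : ¬ (r.1 == "+") = true := by simp_all
        rw [show judgeStep (h1, h2, h3) r = (h1 ++ [r.2], h2, h3) from by
          simp [judgeStep, hlt, ha], ih]
        simp [List.filter_cons, ha, h3', h4']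
      · by_cases ht : r.1 == "~"
        · have h4' : ¬ (r.1 == "+") = true := by simp_all
          rw [show judgeStep (h1, h2, h3) r = (h1, h2 ++ [r.2], h3) from by
            simp [judgeStep, hlt, ha, ht], ih]
          simp [List.filter_cons, ha, ht, h4']
        · by_cases hp : r.1 == "+"
          · rw [show judgeStep (h1, h2, h3) r = (h1, h2, h3 ++ [r.2]) from by
              simp [judgeStep, hlt, ha, ht, hp], ih]
            simp [List.filter_cons, ha, ht, hp]
          · rw [show judgeStep (h1, h2, h3) r = (h1, h2, h3) from by
              simp [judgeStep, hlt, ha, ht, hp], ih]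
            simp [List.filter_cons, ha, ht, hp]

-- ===== VERDICT (by name: the statement is the Claim_ definition above) =====
theorem judge_words_spec : Claim_equal_judge_words := by
  intro relate_word _
  unfold Spec_judge_words judge_words judge_words_alt
  simpa using judge_words_foldl relate_word [] [] []
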